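-- pv_equiv track=rewrite | github.com/glaurungh/enigma | pairs.py | check_pairs
-- ===== SOURCE A (Python) =====
-- def check_pairs(pairs):
--     pairs = pairs.upper()
--     pairs_list = pairs.split()
--     letters = set()
--     for pair in pairs_list:
--         if len(pair) != 2:
--             return False
--         if pair[0]==pair[1]:
--             return False
--         if pair[0] in letters or pair[1] in letters:
--             return False
--         letters.add(pair[0])
--         letters.add(pair[1])
--     return True
-- ===== SOURCE B (Python) =====
-- def check_pairs(pairs):
--     letters = []
--     for pair in pairs.upper().split():
--         if len(pair) != 2 or pair[0] == pair[1]: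
--             return False
--         letters += pair
--     return len(set(letters)) == len(letters)
-- ===== Notes on version B (the rewrite author's own statement) =====
-- stated objective: simpler
-- what changed: The per-pair membership-test-then-add on an incrementally maintained set is removed; the loop only checks each token's structure and collects the letters, and cross-pair duplicate detection becomes one global set-size comparison after the loop.
import Mathlib
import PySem

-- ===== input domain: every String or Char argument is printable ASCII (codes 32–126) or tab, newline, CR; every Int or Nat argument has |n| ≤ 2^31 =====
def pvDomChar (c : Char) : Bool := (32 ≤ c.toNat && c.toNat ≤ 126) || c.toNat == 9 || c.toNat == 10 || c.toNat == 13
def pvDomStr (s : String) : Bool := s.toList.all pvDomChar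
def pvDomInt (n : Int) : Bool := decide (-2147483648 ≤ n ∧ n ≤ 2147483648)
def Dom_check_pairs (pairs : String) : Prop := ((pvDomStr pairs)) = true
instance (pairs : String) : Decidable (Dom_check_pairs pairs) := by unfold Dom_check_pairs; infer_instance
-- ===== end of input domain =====

-- B moves duplicate detection out of the loop: the loop only checks token structure and
-- collects letters; duplicates are detected by one global set-size comparison (objective: simpler).


-- ===== PORT A =====
-- the for-loop with early returns; pair[0]/pair[1] cannot raise (guarded by len(pair) == 2),
-- so pyGetD with a dummy default is exact here
def checkLoopA : List (List Char) → PySem.Set Char → Bool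
  | [], _ => true
  | p :: ps, letters =>
    if p.length ≠ 2 then false
    else if PySem.List.pyGetD p 0 ' ' = PySem.List.pyGetD p 1 ' ' then false
    else if PySem.Set.contains letters (PySem.List.pyGetD p 0 ' ')
            || PySem.Set.contains letters (PySem.List.pyGetD p 1 ' ') then false
    else checkLoopA ps
      (PySem.Set.add (PySem.Set.add letters (PySem.List.pyGetD p 0 ' '))
        (PySem.List.pyGetD p 1 ' '))

def check_pairs (pairs : String) : Bool :=
  checkLoopA (PySem.Chars.split₀ (PySem.Chars.upper pairs.toList)) PySem.Set.empty

-- ===== PORT B =====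
-- structural check per token, letters collected flat; final global duplicate test
def checkLoopB : List (List Char) → List Char → Bool
  | [], letters => PySem.Set.len (PySem.Set.ofList letters) == letters.length
  | p :: ps, letters =>
    if p.length ≠ 2 ∨ PySem.List.pyGetD p 0 ' ' = PySem.List.pyGetD p 1 ' ' then false
    else checkLoopB ps (letters ++ p)

def check_pairs_alt (pairs : String) : Bool :=
  checkLoopB (PySem.Chars.split₀ (PySem.Chars.upper pairs.toList)) []

-- ===== PRECONDITION & SPEC =====
def Spec_check_pairs (pairs : String) (out : Bool) : Prop := out = check_pairs_alt pairs
instance (pairs : String) (out : Bool) : Decidable (Spec_check_pairs pairs out) := by unfold Spec_check_pairs; infer_instance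

-- ===== CLAIM (what is proved, stated in full; the proofs are below) =====
def Claim_equal_check_pairs : Prop := ∀ (pairs : String), Dom_check_pairs pairs → Spec_check_pairs pairs (check_pairs pairs)

-- ===== LEMMAS AND PROOFS =====

-- set(xs) (first occurrences) is a sublist of xs
theorem pv_ofList_sublist (xs : List Char) : (PySem.Set.ofList xs).Sublist xs := by
  induction xs using List.reverseRecOn with
  | nil => simp [PySem.Set.ofList_nil]
  | append_singleton ys y ih =>
    rw [PySem.Set.ofList_append_singleton, PySem.Set.add_eq_ite]
    split_ifs with h
    · exact ih.trans (List.sublist_append_left ys [y])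
    · exact ih.append (List.Sublist.refl [y])

-- once the collected letters contain a duplicate, B's loop can only return false
theorem pv_loopB_false (ts : List (List Char)) (acc : List Char) (h : ¬ acc.Nodup) :
    checkLoopB ts acc = false := by
  induction ts generalizing acc with
  | nil =>
    simp only [checkLoopB, PySem.Set.len, beq_eq_false_iff_ne, ne_eq, Int.natCast_inj]
    intro hlen
    exact h (((pv_ofList_sublist acc).eq_of_length hlen) ▸ PySem.Set.nodup_ofList acc)
  | cons p ps ih =>
    simp only [checkLoopB]
    split_ifs with _
    · rfl
    · exact ih _ (fun hnd => h (hnd.sublist (List.sublist_append_left acc p)))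

-- the loop invariant: A's set is set(acc) for B's duplicate-free collected letters
theorem pv_loop_eq (ts : List (List Char)) (acc : List Char) (h : acc.Nodup) :
    checkLoopA ts (PySem.Set.ofList acc) = checkLoopB ts acc := by
  induction ts generalizing acc with
  | nil =>
    simp only [checkLoopA, checkLoopB, PySem.Set.len,
      PySem.Set.ofList_eq_self_of_nodup _ h]
    simp
  | cons p ps ih =>
    by_cases hl : p.length = 2
    · obtain ⟨a, b, rfl⟩ := List.length_eq_two.mp hl
      have ha : PySem.List.pyGetD [a, b] 0 ' ' = a := by
        simp [PySem.List.pyGetD_zero_cons]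
      have hb : PySem.List.pyGetD [a, b] 1 ' ' = b := by
        have h1 : ((1 : Nat) : Int) = (1 : Int) := rfl
        rw [← h1, PySem.List.pyGetD_natCast]; rfl
      by_cases hab : a = b
      · subst hab
        simp [checkLoopA, checkLoopB, ha, hb]
      · simp only [checkLoopA, checkLoopB, ha, hb]
        rw [if_neg (by simp : ¬ ([a, b].length ≠ 2)),
            if_neg hab,
            if_neg (by simp [hab] : ¬ ([a, b].length ≠ 2 ∨ a = b))]
        by_cases hmem : a ∈ acc ∨ b ∈ acc
        · rw [if_pos (by
            rcases hmem with hm | hm <;>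
              simp [PySem.Set.contains_eq_listContains, PySem.Set.mem_ofList, hm])]
          rw [pv_loopB_false]
          intro hnd
          rcases hmem with hm | hm
          · exact (List.disjoint_of_nodup_append hnd) hm (by simp)
          · exact (List.disjoint_of_nodup_append hnd) hm (by simp)
        · push Not at hmem
          rw [if_neg (by
            simp [PySem.Set.contains_eq_listContains, PySem.Set.mem_ofList,
              hmem.1, hmem.2])]
          have hset : PySem.Set.add (PySem.Set.add (PySem.Set.ofList acc) a) b
              = PySem.Set.ofList (acc ++ [a, b]) := by
            have e : acc ++ [a, b] = (acc ++ [a]) ++ [b] := by simp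
            rw [e, PySem.Set.ofList_append_singleton, PySem.Set.ofList_append_singleton]
          have hnd : (acc ++ [a, b]).Nodup := by
            refine List.Nodup.append h (by simp [hab]) ?_
            intro x hx hy
            simp only [List.mem_cons, List.not_mem_nil, or_false] at hy
            rcases hy with rfl | rfl
            · exact hmem.1 hx
            · exact hmem.2 hx
          rw [hset, ih _ hnd]
    · simp [checkLoopA, checkLoopB, hl]

-- ===== VERDICT (by name: the statement is the Claim_ definition above) =====
theorem check_pairs_spec : Claim_equal_check_pairs := by
  intro pairs _
  unfold Spec_check_pairs check_pairs check_pairs_alt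
  have := pv_loop_eq (PySem.Chars.split₀ (PySem.Chars.upper pairs.toList)) [] List.nodup_nil
  simpa [PySem.Set.empty] using this
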